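-- pv_equiv track=rewrite | github.com/uktrade/great-cms | core/utils.py | map_recency_months
-- ===== SOURCE A (Python) =====
-- def map_recency_months(month):
--     """
--     Helper method to decide which month should be applied for scoring
--
--     Following is criteria to check recency
--     https://uktrade.atlassian.net/wiki/spaces/Great/pages/2139750605/Ranking+mechanism+-+CMS+UI+for+weighting+and+threshold+changes
--
--     <= Recency 3 months
--     <= Recency 6 months
--     <= Recency 9 months
--     <= Recency 12 months
--     <= Recency 15 months
--     <= Recency 18 months
--     <= Recency 21 months
--     <= Recency 24 months and > 24 months
--     """
--
--     # month list of 3 to 24 years in 3 month interval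
--     recency_months = range(3, 25, 3)
--
--     for index, month_number in enumerate(recency_months):
--         if month_number >= month:
--             return month_number
--         if month_number < month < recency_months[index + 1]:
--             return recency_months[index + 1]
--         if month > recency_months[-1]:
--             return recency_months[-1]
-- ===== SOURCE B (Python) =====
-- def map_recency_months(month):
--     # closed form: ceiling to the next multiple of 3, clamped to [3, 24]
--     return min(24, max(3, 3 * (-(-month // 3))))
-- ===== Notes on version B (the rewrite author's own statement) =====
-- stated objective: simpler
-- what changed: Replaced the 8-iteration enumerate loop with three branch conditions per step by a one-line closed-form expression min(24, max(3, 3*ceil(month/3))).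
import Mathlib
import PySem

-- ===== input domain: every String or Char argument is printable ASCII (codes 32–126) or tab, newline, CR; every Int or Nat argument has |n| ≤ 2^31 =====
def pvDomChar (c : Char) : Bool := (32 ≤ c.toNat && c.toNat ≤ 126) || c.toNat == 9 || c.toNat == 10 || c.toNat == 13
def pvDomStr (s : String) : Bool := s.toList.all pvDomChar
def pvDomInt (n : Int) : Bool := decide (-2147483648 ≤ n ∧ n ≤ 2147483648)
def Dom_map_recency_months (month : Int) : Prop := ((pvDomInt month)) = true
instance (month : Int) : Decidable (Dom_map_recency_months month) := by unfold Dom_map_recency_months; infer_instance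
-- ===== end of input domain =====

-- B replaces A's loop over range(3, 25, 3) by the closed form min(24, max(3, 3*ceil(month/3))) (simpler).

-- ===== PORT A =====
-- recency_months = range(3, 25, 3)
def recency_list : List Int := PySem.List.pyRange 3 25 3

-- the for-loop over enumerate(recency_months); falling off the loop (Python: None) is
-- unreachable for every Int month, as is the IndexError of recency_months[index + 1] at
-- index 7 (the first branch fires before it); the 0 defaults below are never the result.
def mrmLoop (month : Int) : List (Int × Int) → Int
  | [] => 0
  | (index, month_number) :: rest =>
    if month_number ≥ month then month_number
    else if month_number < month ∧ month < (PySem.List.pyGet? recency_list (index + 1)).getD 0 then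
      (PySem.List.pyGet? recency_list (index + 1)).getD 0
    else if month > (PySem.List.pyGet? recency_list (-1)).getD 0 then
      (PySem.List.pyGet? recency_list (-1)).getD 0
    else mrmLoop month rest

def map_recency_months (month : Int) : Int :=
  mrmLoop month (PySem.List.enumerate recency_list)

-- ===== PORT B =====
-- B: min(24, max(3, 3 * (-(-month // 3))))
def map_recency_months_alt (month : Int) : Int :=
  min 24 (max 3 (3 * (-(PySem.Int.floordiv (-month) 3))))

-- ===== PRECONDITION & SPEC =====
def Spec_map_recency_months (month : Int) (out : Int) : Prop := out = map_recency_months_alt month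
instance (month : Int) (out : Int) : Decidable (Spec_map_recency_months month out) := by unfold Spec_map_recency_months; infer_instance

-- ===== CLAIM (what is proved, stated in full; the proofs are below) =====
def Claim_equal_map_recency_months : Prop := ∀ (month : Int), Dom_map_recency_months month → Spec_map_recency_months month (map_recency_months month)

-- ===== LEMMAS AND PROOFS =====

theorem mrm_hit1 (month i m : Int) (rest : List (Int × Int)) (h1 : m ≥ month) :
    mrmLoop month ((i, m) :: rest) = m := by
  rw [mrmLoop, if_pos h1]

theorem mrm_hit2 (month i m : Int) (rest : List (Int × Int)) (h1 : ¬ m ≥ month)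
    (h2 : m < month ∧ month < (PySem.List.pyGet? recency_list (i + 1)).getD 0) :
    mrmLoop month ((i, m) :: rest) = (PySem.List.pyGet? recency_list (i + 1)).getD 0 := by
  rw [mrmLoop, if_neg h1, if_pos h2]

theorem mrm_hit3 (month i m : Int) (rest : List (Int × Int)) (h1 : ¬ m ≥ month)
    (h2 : ¬ (m < month ∧ month < (PySem.List.pyGet? recency_list (i + 1)).getD 0))
    (h3 : month > (PySem.List.pyGet? recency_list (-1)).getD 0) :
    mrmLoop month ((i, m) :: rest) = (PySem.List.pyGet? recency_list (-1)).getD 0 := by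
  rw [mrmLoop, if_neg h1, if_neg h2, if_pos h3]

theorem mrm_step (month i m : Int) (rest : List (Int × Int)) (h1 : ¬ m ≥ month)
    (h2 : ¬ (m < month ∧ month < (PySem.List.pyGet? recency_list (i + 1)).getD 0))
    (h3 : ¬ month > (PySem.List.pyGet? recency_list (-1)).getD 0) :
    mrmLoop month ((i, m) :: rest) = mrmLoop month rest := by
  rw [mrmLoop, if_neg h1, if_neg h2, if_neg h3]

theorem hl_enum : PySem.List.enumerate recency_list =
    [(0,3),(1,6),(2,9),(3,12),(4,15),(5,18),(6,21),(7,24)] := by decide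

theorem g1 : (PySem.List.pyGet? recency_list ((0:Int) + 1)).getD 0 = 6 := by decide
theorem g2 : (PySem.List.pyGet? recency_list ((1:Int) + 1)).getD 0 = 9 := by decide
theorem g3 : (PySem.List.pyGet? recency_list ((2:Int) + 1)).getD 0 = 12 := by decide
theorem g4 : (PySem.List.pyGet? recency_list ((3:Int) + 1)).getD 0 = 15 := by decide
theorem g5 : (PySem.List.pyGet? recency_list ((4:Int) + 1)).getD 0 = 18 := by decide
theorem g6 : (PySem.List.pyGet? recency_list ((5:Int) + 1)).getD 0 = 21 := by decide
theorem g7 : (PySem.List.pyGet? recency_list ((6:Int) + 1)).getD 0 = 24 := by decide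
theorem gm : (PySem.List.pyGet? recency_list (-1)).getD 0 = 24 := by decide

theorem mrm_a_char (month : Int) :
    map_recency_months month =
      if month ≤ 3 then 3 else if month ≤ 6 then 6 else if month ≤ 9 then 9
      else if month ≤ 12 then 12 else if month ≤ 15 then 15 else if month ≤ 18 then 18
      else if month ≤ 21 then 21 else 24 := by
  rw [map_recency_months, hl_enum]
  by_cases hgt : month > 24
  · rw [mrm_hit3 month 0 3 _ (by omega) (by rw [g1]; omega) (by rw [gm]; omega), gm]
    split_ifs <;> omega
  by_cases h3 : month ≤ 3
  · rw [mrm_hit1 month 0 3 _ (by omega)]; split_ifs <;> omega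
  by_cases h6 : month ≤ 6
  · by_cases hl6 : month < 6
    · rw [mrm_hit2 month 0 3 _ (by omega) ⟨by omega, by rw [g1]; omega⟩, g1]
      split_ifs <;> omega
    · rw [mrm_step month 0 3 _ (by omega) (by rw [g1]; omega) (by rw [gm]; omega),
        mrm_hit1 month 1 6 _ (by omega)]
      split_ifs <;> omega
  rw [mrm_step month 0 3 _ (by omega) (by rw [g1]; omega) (by rw [gm]; omega)]
  by_cases h9 : month ≤ 9
  · by_cases hl9 : month < 9
    · rw [mrm_hit2 month 1 6 _ (by omega) ⟨by omega, by rw [g2]; omega⟩, g2]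
      split_ifs <;> omega
    · rw [mrm_step month 1 6 _ (by omega) (by rw [g2]; omega) (by rw [gm]; omega),
        mrm_hit1 month 2 9 _ (by omega)]
      split_ifs <;> omega
  rw [mrm_step month 1 6 _ (by omega) (by rw [g2]; omega) (by rw [gm]; omega)]
  by_cases h12 : month ≤ 12
  · by_cases hl12 : month < 12
    · rw [mrm_hit2 month 2 9 _ (by omega) ⟨by omega, by rw [g3]; omega⟩, g3]
      split_ifs <;> omega
    · rw [mrm_step month 2 9 _ (by omega) (by rw [g3]; omega) (by rw [gm]; omega),
        mrm_hit1 month 3 12 _ (by omega)]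
      split_ifs <;> omega
  rw [mrm_step month 2 9 _ (by omega) (by rw [g3]; omega) (by rw [gm]; omega)]
  by_cases h15 : month ≤ 15
  · by_cases hl15 : month < 15
    · rw [mrm_hit2 month 3 12 _ (by omega) ⟨by omega, by rw [g4]; omega⟩, g4]
      split_ifs <;> omega
    · rw [mrm_step month 3 12 _ (by omega) (by rw [g4]; omega) (by rw [gm]; omega),
        mrm_hit1 month 4 15 _ (by omega)]
      split_ifs <;> omega
  rw [mrm_step month 3 12 _ (by omega) (by rw [g4]; omega) (by rw [gm]; omega)]
  by_cases h18 : month ≤ 18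
  · by_cases hl18 : month < 18
    · rw [mrm_hit2 month 4 15 _ (by omega) ⟨by omega, by rw [g5]; omega⟩, g5]
      split_ifs <;> omega
    · rw [mrm_step month 4 15 _ (by omega) (by rw [g5]; omega) (by rw [gm]; omega),
        mrm_hit1 month 5 18 _ (by omega)]
      split_ifs <;> omega
  rw [mrm_step month 4 15 _ (by omega) (by rw [g5]; omega) (by rw [gm]; omega)]
  by_cases h21 : month ≤ 21
  · by_cases hl21 : month < 21
    · rw [mrm_hit2 month 5 18 _ (by omega) ⟨by omega, by rw [g6]; omega⟩, g6]
      split_ifs <;> omega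
    · rw [mrm_step month 5 18 _ (by omega) (by rw [g6]; omega) (by rw [gm]; omega),
        mrm_hit1 month 6 21 _ (by omega)]
      split_ifs <;> omega
  rw [mrm_step month 5 18 _ (by omega) (by rw [g6]; omega) (by rw [gm]; omega)]
  by_cases hl24 : month < 24
  · rw [mrm_hit2 month 6 21 _ (by omega) ⟨by omega, by rw [g7]; omega⟩, g7]
    split_ifs <;> omega
  · rw [mrm_step month 6 21 _ (by omega) (by rw [g7]; omega) (by rw [gm]; omega),
      mrm_hit1 month 7 24 _ (by omega)]
    split_ifs <;> omega

theorem mrm_alt_char (month : Int) :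
    map_recency_months_alt month =
      if month ≤ 3 then 3 else if month ≤ 6 then 6 else if month ≤ 9 then 9
      else if month ≤ 12 then 12 else if month ≤ 15 then 15 else if month ≤ 18 then 18
      else if month ≤ 21 then 21 else 24 := by
  have h : PySem.Int.floordiv (-month) 3 = (-month) / 3 :=
    PySem.Int.floordiv_eq_ediv_of_pos (by omega)
  simp only [map_recency_months_alt, h]
  split_ifs <;> omega

-- ===== VERDICT (by name: the statement is the Claim_ definition above) =====
theorem map_recency_months_spec : Claim_equal_map_recency_months := by
  intro month _
  unfold Spec_map_recency_months
  rw [mrm_a_char, mrm_alt_char]
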